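-- pv_equiv track=rewrite | github.com/ziongh/miller | python/miller/tools/naming/parsers.py | strip_common_prefixes
-- ===== SOURCE A (Python) =====
-- def strip_common_prefixes(symbol_name: str) -> list[str]:
--     """
--     Strip common type prefixes from symbol names.
--
--     Common prefixes in different languages:
--     - Interfaces: I, T (TypeScript, C#)
--     - Enums: E (C#, TypeScript)
--     - Types: T (TypeScript, Rust)
--     - Abstract: A (C++, Java)
--     - Base: Base (all languages)
--
--     Args:
--         symbol_name: Symbol name that may have prefix
--
--     Returns:
--         List of variants: [original, without_prefix, ...]
--
--     Examples:
--         >>> strip_common_prefixes("IUser")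
--         ["IUser", "User"]
--
--         >>> strip_common_prefixes("TUserRole")
--         ["TUserRole", "UserRole"]
--
--         >>> strip_common_prefixes("EUserStatus")
--         ["EUserStatus", "UserStatus"]
--
--         >>> strip_common_prefixes("BaseService")
--         ["BaseService", "Service"]
--
--     Edge Cases:
--         - No prefix: "User" → ["User"] (only original)
--         - Ambiguous: "If" → ["If"] (not a prefix)
--         - Multiple: "IBaseUser" → ["IBaseUser", "BaseUser", "User"]
--     """
--     results = [symbol_name]
--
--     # Single letter prefixes (I, T, E, A)
--     if len(symbol_name) > 2 and symbol_name[0] in 'ITEA' and symbol_name[1].isupper():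
--         # Check it's not a two-letter word like "If" or "It"
--         without_prefix = symbol_name[1:]
--         results.append(without_prefix)
--
--         # Recursively check for more prefixes (IBaseUser → BaseUser → User)
--         more_variants = strip_common_prefixes(without_prefix)
--         for variant in more_variants:
--             if variant not in results:
--                 results.append(variant)
--
--     # "Base" prefix
--     if symbol_name.startswith("Base") and len(symbol_name) > 4 and symbol_name[4].isupper():
--         without_prefix = symbol_name[4:]
--         results.append(without_prefix)
--
--         # Recursively check
--         more_variants = strip_common_prefixes(without_prefix)
--         for variant in more_variants:
--             if variant not in results:
--                 results.append(variant)
--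
--     return results
-- ===== SOURCE B (Python) =====
-- def strip_common_prefixes(symbol_name: str) -> list[str]:
--     """Iteratively strip one prefix per loop iteration, collecting variants."""
--     results = [symbol_name]
--     current = symbol_name
--     while True:
--         if len(current) > 2 and current[0] in 'ITEA' and current[1].isupper():
--             current = current[1:]
--         elif current.startswith("Base") and len(current) > 4 and current[4].isupper():
--             current = current[4:]
--         else:
--             break
--         results.append(current)
--     return results
-- ===== Notes on version B (the rewrite author's own statement) =====
-- stated objective: simpler
-- what changed: Replaces A's recursion with per-level duplicate filtering by a single iterative loop that strips one prefix per iteration and appends it; the branches are mutually exclusive so the dedup check is provably a no-op.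
import Mathlib
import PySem

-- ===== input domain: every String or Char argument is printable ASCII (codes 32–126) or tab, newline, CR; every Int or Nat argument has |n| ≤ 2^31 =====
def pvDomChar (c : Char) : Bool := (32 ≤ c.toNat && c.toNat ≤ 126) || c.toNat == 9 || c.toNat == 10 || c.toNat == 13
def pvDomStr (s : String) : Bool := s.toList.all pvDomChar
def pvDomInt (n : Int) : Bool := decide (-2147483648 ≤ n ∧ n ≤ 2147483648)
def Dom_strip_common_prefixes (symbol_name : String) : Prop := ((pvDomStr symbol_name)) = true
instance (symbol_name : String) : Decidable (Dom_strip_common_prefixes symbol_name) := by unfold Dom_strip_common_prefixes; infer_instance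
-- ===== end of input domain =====

-- B replaces A's recursion-plus-dedup with a single iterative pass stripping one prefix per step (objective: simpler).

-- ===== PORT A =====
-- guard of A's first branch: len(s) > 2 and s[0] in 'ITEA' and s[1].isupper()
-- (pattern `c0 :: c1 :: _ :: _` is exactly len > 2 with the two indexings)
def pvG1 (cs : List Char) : Bool :=
  match cs with
  | c0 :: c1 :: _ :: _ => (c0 == 'I' || c0 == 'T' || c0 == 'E' || c0 == 'A') && PySem.Chars.isupper c1
  | _ => false

-- guard of A's second branch: s.startswith("Base") and len(s) > 4 and s[4].isupper()
def pvGBase (cs : List Char) : Bool :=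
  match cs with
  | b :: a :: s :: e :: c4 :: _ =>
      (b == 'B') && (a == 'a') && (s == 's') && (e == 'e') && PySem.Chars.isupper c4
  | _ => false

theorem pvG1_len {cs : List Char} (h : pvG1 cs = true) : 2 < cs.length := by
  rcases cs with _ | ⟨c0, _ | ⟨c1, _ | ⟨c2, t⟩⟩⟩ <;> simp [pvG1] at h ⊢

theorem pvGBase_len {cs : List Char} (h : pvGBase cs = true) : 4 < cs.length := by
  rcases cs with _ | ⟨b, _ | ⟨a, _ | ⟨s, _ | ⟨e, _ | ⟨c4, t⟩⟩⟩⟩⟩ <;> simp [pvGBase] at h ⊢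

-- A, on List Char (s[1:] / s[4:] are List.drop — indices are nonnegative literals, exact)
def pvStripA (cs : List Char) : List (List Char) :=
  let results := [cs]
  let results :=
    if h1 : pvG1 cs = true then
      let wp := cs.drop 1
      let results := results ++ [wp]
      let mv := pvStripA wp
      mv.foldl (fun r v => if v ∈ r then r else r ++ [v]) results
    else results
  if h2 : pvGBase cs = true then
    let wp := cs.drop 4
    let results := results ++ [wp]
    let mv := pvStripA wp
    mv.foldl (fun r v => if v ∈ r then r else r ++ [v]) results
  else results
termination_by cs.length
decreasing_by
  · have := pvG1_len h1; simp [List.length_drop]; omega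
  · have := pvGBase_len h2; simp [List.length_drop]; omega

def strip_common_prefixes (symbol_name : String) : List String :=
  (pvStripA symbol_name.toList).map String.mk

-- ===== PORT B =====
-- B's while loop as a tail recursion over (current, results)
def pvStripB (current : List Char) (acc : List (List Char)) : List (List Char) :=
  if h1 : ((2 < current.length : Bool) &&
           (current.take 1 == ['I'] || current.take 1 == ['T'] ||
            current.take 1 == ['E'] || current.take 1 == ['A']) &&
           PySem.Chars.isupper (current.getD 1 ' ')) = true then
    pvStripB (current.drop 1) (acc ++ [current.drop 1])
  else if h2 : (PySem.Chars.startswith current ['B','a','s','e'] &&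
                (4 < current.length : Bool) &&
                PySem.Chars.isupper (current.getD 4 ' ')) = true then
    pvStripB (current.drop 4) (acc ++ [current.drop 4])
  else acc
termination_by current.length
decreasing_by
  · simp at h1; simp [List.length_drop]; omega
  · simp at h2; simp [List.length_drop]; omega

def strip_common_prefixes_alt (symbol_name : String) : List String :=
  (pvStripB symbol_name.toList [symbol_name.toList]).map String.mk

-- ===== PRECONDITION & SPEC =====
def Spec_strip_common_prefixes (symbol_name : String) (out : List String) : Prop := out = strip_common_prefixes_alt symbol_name
instance (symbol_name : String) (out : List String) : Decidable (Spec_strip_common_prefixes symbol_name out) := by unfold Spec_strip_common_prefixes; infer_instance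

-- ===== CLAIM (what is proved, stated in full; the proofs are below) =====
def Claim_equal_strip_common_prefixes : Prop := ∀ (symbol_name : String), Dom_strip_common_prefixes symbol_name → Spec_strip_common_prefixes symbol_name (strip_common_prefixes symbol_name)

-- ===== LEMMAS AND PROOFS =====

theorem pv_not_both {cs : List Char} (h : pvG1 cs = true) : pvGBase cs = false := by
  rcases cs with _ | ⟨c0, _ | ⟨c1, _ | ⟨c2, t⟩⟩⟩ <;> simp [pvG1] at h
  obtain ⟨h0, -⟩ := h
  rcases t with _ | ⟨c3, _ | ⟨c4, t⟩⟩ <;> simp [pvGBase]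
  rcases h0 with ((h0 | h0) | h0) | h0 <;> subst h0 <;> simp

-- B's guards coincide with A's
theorem pvBG1_eq (cs : List Char) :
    (((2 < cs.length : Bool) &&
      (cs.take 1 == ['I'] || cs.take 1 == ['T'] || cs.take 1 == ['E'] || cs.take 1 == ['A']) &&
      PySem.Chars.isupper (cs.getD 1 ' ')) = true) ↔ pvG1 cs = true := by
  match cs with
  | c0 :: c1 :: c2 :: t => simp [pvG1, List.take, List.getD]; try tauto
  | [] => simp [pvG1]
  | [c0] => simp [pvG1]
  | [c0, c1] => simp [pvG1]

theorem pvBGBase_eq (cs : List Char) :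
    ((PySem.Chars.startswith cs ['B','a','s','e'] &&
      (4 < cs.length : Bool) &&
      PySem.Chars.isupper (cs.getD 4 ' ')) = true) ↔ pvGBase cs = true := by
  rcases cs with _ | ⟨b, _ | ⟨a, _ | ⟨s, _ | ⟨e, _ | ⟨c4, t⟩⟩⟩⟩⟩ <;>
    simp [pvGBase, PySem.Chars.startswith_iff, List.cons_prefix_cons, List.getD]
  all_goals tauto

-- the common chain: one prefix stripped per step
def pvChain (cs : List Char) : List (List Char) :=
  if h1 : pvG1 cs = true then cs :: pvChain (cs.drop 1)
  else if h2 : pvGBase cs = true then cs :: pvChain (cs.drop 4)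
  else [cs]
termination_by cs.length
decreasing_by
  · have := pvG1_len h1; simp [List.length_drop]; omega
  · have := pvGBase_len h2; simp [List.length_drop]; omega

theorem pvChain_cons (cs : List Char) : pvChain cs = cs :: (pvChain cs).tail := by
  rw [pvChain]; split_ifs <;> simp

theorem pvChain_len (cs : List Char) : ∀ v ∈ pvChain cs, v.length ≤ cs.length := by
  induction cs using pvChain.induct with
  | case1 cs h1 ih =>
    intro v hv
    rw [pvChain, dif_pos h1] at hv
    rcases List.mem_cons.mp hv with rfl | hv
    · exact le_rfl
    · exact (ih v hv).trans (by simp)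
  | case2 cs h1 h2 ih =>
    intro v hv
    rw [pvChain, dif_neg h1, dif_pos h2] at hv
    rcases List.mem_cons.mp hv with rfl | hv
    · exact le_rfl
    · exact (ih v hv).trans (by simp)
  | case3 cs h1 h2 =>
    intro v hv
    rw [pvChain, dif_neg h1, dif_neg h2] at hv
    simp at hv; subst hv; exact le_rfl

theorem pvChain_pairwise (cs : List Char) : List.Pairwise (fun a b => b.length < a.length) (pvChain cs) := by
  induction cs using pvChain.induct with
  | case1 cs h1 ih =>
    rw [pvChain, dif_pos h1, List.pairwise_cons]
    refine ⟨fun v hv => ?_, ih⟩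
    have hlen := pvChain_len (cs.drop 1) v hv
    have := pvG1_len h1
    simp at hlen; omega
  | case2 cs h1 h2 ih =>
    rw [pvChain, dif_neg h1, dif_pos h2, List.pairwise_cons]
    refine ⟨fun v hv => ?_, ih⟩
    have hlen := pvChain_len (cs.drop 4) v hv
    have := pvGBase_len h2
    simp at hlen; omega
  | case3 cs h1 h2 =>
    rw [pvChain, dif_neg h1, dif_neg h2]
    simp

theorem pvChain_tail_lt (cs : List Char) : ∀ v ∈ (pvChain cs).tail, v.length < cs.length := by
  have hp := pvChain_pairwise cs
  rw [pvChain_cons cs, List.pairwise_cons] at hp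
  exact hp.1

theorem pvChain_nodup (cs : List Char) : (pvChain cs).Nodup :=
  (pvChain_pairwise cs).imp (fun h he => by subst he; omega)

theorem pv_foldl_dedup (t : List (List Char)) :
    ∀ r0 : List (List Char), t.Nodup → (∀ v ∈ t, v ∉ r0) →
    t.foldl (fun r v => if v ∈ r then r else r ++ [v]) r0 = r0 ++ t := by
  induction t with
  | nil => intro r0 _ _; simp
  | cons v t ih =>
    intro r0 hnd hdisj
    simp only [List.foldl_cons]
    rw [if_neg (hdisj v (List.mem_cons_self))]
    rw [ih (r0 ++ [v]) hnd.of_cons]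
    · simp
    · intro w hw
      simp only [List.mem_append, List.mem_singleton]
      push_neg
      exact ⟨hdisj w (List.mem_cons_of_mem _ hw), fun he => (List.nodup_cons.mp hnd).1 (he ▸ hw)⟩

theorem pv_dedup_step (cs wp : List Char) (hlt : wp.length < cs.length) :
    (pvChain wp).foldl (fun r v => if v ∈ r then r else r ++ [v]) ([cs] ++ [wp]) =
      cs :: pvChain wp := by
  have hc := pvChain_cons wp
  have hnd : ((pvChain wp).tail).Nodup := by
    have := pvChain_nodup wp
    rw [hc, List.nodup_cons] at this
    exact this.2
  conv_lhs => rw [hc]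
  simp only [List.foldl_cons]
  rw [if_pos (by simp)]
  rw [pv_foldl_dedup _ _ hnd]
  · conv_rhs => rw [hc]
    simp
  · intro v hv
    have hvlt := pvChain_tail_lt wp v hv
    simp only [List.mem_append, List.mem_singleton]
    push_neg
    constructor <;> intro he <;> subst he <;> omega

theorem pvStripA_eq_chain : ∀ cs, pvStripA cs = pvChain cs := by
  intro cs
  induction cs using pvChain.induct with
  | case1 cs h1 ih =>
    have h2 := pv_not_both h1
    rw [pvStripA, pvChain]
    simp only [dif_pos h1, dif_neg (by simp [h2] : ¬ pvGBase cs = true), ih]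
    rw [pv_dedup_step cs (cs.drop 1) (by have := pvG1_len h1; simp; omega)]
  | case2 cs h1 h2 ih =>
    rw [pvStripA, pvChain]
    simp only [dif_neg h1, dif_pos h2, ih]
    rw [pv_dedup_step cs (cs.drop 4) (by have := pvGBase_len h2; simp; omega)]
  | case3 cs h1 h2 =>
    rw [pvStripA, pvChain]
    simp only [dif_neg h1, dif_neg h2]

theorem pvStripB_eq : ∀ (cs : List Char) (acc : List (List Char)),
    pvStripB cs acc = acc ++ (pvChain cs).tail := by
  intro cs acc
  induction cs, acc using pvStripB.induct with
  | case1 cs acc h1 ih =>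
    have hg1 : pvG1 cs = true := (pvBG1_eq cs).mp h1
    rw [pvStripB, dif_pos h1, ih,
        show pvChain cs = cs :: pvChain (cs.drop 1) by rw [pvChain]; rw [dif_pos hg1],
        List.tail_cons]
    conv_rhs => rw [pvChain_cons (cs.drop 1)]
    simp
  | case2 cs acc h1 h2 ih =>
    have hg1 : ¬ pvG1 cs = true := fun hg => h1 ((pvBG1_eq cs).mpr hg)
    have hg2 : pvGBase cs = true := (pvBGBase_eq cs).mp h2
    rw [pvStripB, dif_neg h1, dif_pos h2, ih,
        show pvChain cs = cs :: pvChain (cs.drop 4) by rw [pvChain]; rw [dif_neg hg1]; rw [dif_pos hg2],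
        List.tail_cons]
    conv_rhs => rw [pvChain_cons (cs.drop 4)]
    simp
  | case3 cs acc h1 h2 =>
    have hg1 : ¬ pvG1 cs = true := fun hg => h1 ((pvBG1_eq cs).mpr hg)
    have hg2 : ¬ pvGBase cs = true := fun hg => h2 ((pvBGBase_eq cs).mpr hg)
    rw [pvStripB, dif_neg h1, dif_neg h2,
        show pvChain cs = [cs] by rw [pvChain]; rw [dif_neg hg1]; rw [dif_neg hg2],
        List.tail_cons, List.append_nil]

-- ===== VERDICT (by name: the statement is the Claim_ definition above) =====
theorem strip_common_prefixes_spec : Claim_equal_strip_common_prefixes := by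
  intro s _
  unfold Spec_strip_common_prefixes strip_common_prefixes strip_common_prefixes_alt
  rw [pvStripA_eq_chain, pvStripB_eq, List.singleton_append, ← pvChain_cons]
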